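-- pv_equiv track=rewrite | github.com/millermeares/AdventOfCode | 2024/08/solve.py | make_antennas_map
-- ===== SOURCE A (Python) =====
-- def make_antennas_map(grid):
--   antennas = {}
--   for i in range(0, len(grid)):
--     for j in range(0, len(grid[i])):
--       if grid[i][j] == '.':
--         continue
--       if grid[i][j] not in antennas:
--         antennas[grid[i][j]] = []
--       # (x, y)
--       antennas[grid[i][j]].append((j, i))
--   return antennas
-- ===== SOURCE B (Python) =====
-- def make_antennas_map(grid):
--   cells = [(c, (j, i)) for i, row in enumerate(grid) for j, c in enumerate(row) if c != '.']
--   keys = list(dict.fromkeys(c for c, _ in cells))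
--   return {k: [p for c, p in cells if c == k] for k in keys}
-- ===== Notes on version B (the rewrite author's own statement) =====
-- stated objective: alternative
-- what changed: A builds the dict incrementally, per cell inserting an empty list on first sight of a character and appending; B first flattens the grid into a flat (char, coord) list in one comprehension, then takes the distinct characters via dict.fromkeys and builds each group by filtering the flat list per key.
import Mathlib
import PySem

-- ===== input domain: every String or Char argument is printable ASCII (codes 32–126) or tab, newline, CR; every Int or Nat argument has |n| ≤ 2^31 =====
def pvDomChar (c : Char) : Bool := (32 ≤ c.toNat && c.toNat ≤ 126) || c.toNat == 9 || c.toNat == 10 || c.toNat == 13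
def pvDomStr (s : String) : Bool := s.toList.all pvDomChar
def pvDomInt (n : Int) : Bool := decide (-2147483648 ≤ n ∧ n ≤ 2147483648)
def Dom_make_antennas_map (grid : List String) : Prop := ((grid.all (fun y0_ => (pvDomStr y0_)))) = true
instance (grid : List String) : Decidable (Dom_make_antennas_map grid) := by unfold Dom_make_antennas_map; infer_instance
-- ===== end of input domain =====

-- B replaces A's incremental per-cell dict insertion with a two-phase pass — flatten the grid into a
-- (char, coord) list, then build each key's group by a per-key filter (objective: alternative, same cost class).

-- ===== PORT A =====
def make_antennas_map (grid : List String) : List (String × List (Int × Int)) :=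
  let antennas : PySem.Dict String (List (Int × Int)) :=
    (PySem.List.pyRange 0 (grid.length : Int) 1).foldl (fun antennas i =>
      let row := (PySem.List.pyGetD grid i "").toList
      (PySem.List.pyRange 0 (row.length : Int) 1).foldl (fun antennas j =>
        let c := String.ofList [PySem.List.pyGetD row j ' ']
        if c = "." then antennas
        else
          let antennas := if antennas.contains c then antennas
                          else antennas.insert c ([] : List (Int × Int))
          antennas.modify c [] (fun l => l ++ [(j, i)])) antennas) PySem.Dict.empty
  antennas.items

-- ===== PORT B =====
def make_antennas_map_alt (grid : List String) : List (String × List (Int × Int)) :=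
  let cells : List (String × (Int × Int)) :=
    (PySem.List.enumerate grid 0).flatMap (fun ir =>
      (PySem.List.enumerate ir.2.toList 0).filterMap (fun jc =>
        if String.ofList [jc.2] ≠ "." then some (String.ofList [jc.2], (jc.1, ir.1)) else none))
  let keys : PySem.Set String := PySem.Set.ofList (cells.map (·.1))
  keys.map (fun k => (k, (cells.filter (fun p => p.1 == k)).map (·.2)))

-- ===== PRECONDITION & SPEC =====
def Spec_make_antennas_map (grid : List String) (out : List (String × List (Int × Int))) : Prop := out = make_antennas_map_alt grid
instance (grid : List String) (out : List (String × List (Int × Int))) : Decidable (Spec_make_antennas_map grid out) := by unfold Spec_make_antennas_map; infer_instance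

-- ===== CLAIM (what is proved, stated in full; the proofs are below) =====
def Claim_equal_make_antennas_map : Prop := ∀ (grid : List String), Dom_make_antennas_map grid → Spec_make_antennas_map grid (make_antennas_map grid)

-- ===== LEMMAS AND PROOFS =====

theorem foldl_pyRange_eq_foldl_enumerate {α β : Type} (xs : List α) (d : α)
    (g : β → Int → α → β) (init : β) :
    (PySem.List.pyRange 0 (xs.length : Int) 1).foldl
      (fun acc j => g acc j (PySem.List.pyGetD xs j d)) init
    = (PySem.List.enumerate xs 0).foldl (fun acc p => g acc p.1 p.2) init := by
  rw [PySem.List.enumerate_eq_map_pyRange (d := d), List.foldl_map]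
  simp [PySem.List.len_eq]

theorem foldl_skip_filterMap {α β γ : Type} (P : α → Prop) [DecidablePred P]
    (g : α → γ) (step : β → γ → β) (l : List α) (init : β) :
    l.foldl (fun acc x => if P x then acc else step acc (g x)) init
    = (l.filterMap (fun x => if P x then none else some (g x))).foldl step init := by
  induction l generalizing init with
  | nil => rfl
  | cons x t ih =>
    simp only [List.foldl_cons, List.filterMap_cons]
    split_ifs with h
    · exact ih init
    · simp [ih]

theorem step_eq_modify (d : PySem.Dict String (List (Int × Int))) (k : String) (p : Int × Int) :
    ((if d.contains k then d else d.insert k ([] : List (Int × Int))).modify k []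
        (fun l => l ++ [p]))
    = d.modify k [] (fun l => l ++ [p]) := by
  by_cases h : d.contains k = true
  · rw [if_pos h]
  · rw [if_neg h]
    simp [PySem.Dict.modify, PySem.Dict.insert_insert_self,
      PySem.Dict.getD_insert_self, PySem.Dict.getD_of_not_contains _ _ (by simpa using h)]

theorem inner_row (i : Int) (row : List Char) (d : PySem.Dict String (List (Int × Int))) :
    (PySem.List.pyRange 0 (row.length : Int) 1).foldl (fun antennas j =>
        if String.ofList [PySem.List.pyGetD row j ' '] = "." then antennas
        else
          (if antennas.contains (String.ofList [PySem.List.pyGetD row j ' ']) then antennas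
           else antennas.insert (String.ofList [PySem.List.pyGetD row j ' ']) ([] : List (Int × Int))).modify
            (String.ofList [PySem.List.pyGetD row j ' ']) [] (fun l => l ++ [(j, i)])) d
    = ((PySem.List.enumerate row 0).filterMap (fun jc =>
        if String.ofList [jc.2] ≠ "." then some (String.ofList [jc.2], (jc.1, i)) else none)).foldl
        (fun d p => d.modify p.1 [] (fun l => l ++ [p.2])) d := by
  refine Eq.trans (foldl_pyRange_eq_foldl_enumerate row ' '
    (fun acc j c' =>
      if String.ofList [c'] = "." then acc
      else (if acc.contains (String.ofList [c']) then acc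
            else acc.insert (String.ofList [c']) ([] : List (Int × Int))).modify
             (String.ofList [c']) [] (fun l => l ++ [(j, i)])) d) ?_
  have hbody : (fun (acc : PySem.Dict String (List (Int × Int))) (p : Int × Char) =>
      if String.ofList [p.2] = "." then acc
      else (if acc.contains (String.ofList [p.2]) then acc
            else acc.insert (String.ofList [p.2]) ([] : List (Int × Int))).modify
             (String.ofList [p.2]) [] (fun l => l ++ [(p.1, i)]))
      = (fun acc p =>
      if String.ofList [p.2] = "." then acc
      else acc.modify (String.ofList [p.2]) [] (fun l => l ++ [(p.1, i)])) := by
    funext acc p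
    split_ifs with h1 h2
    · rfl
    · rfl
    · have h := step_eq_modify acc (String.ofList [p.2]) (p.1, i)
      rwa [if_neg h2] at h
  rw [hbody]
  refine Eq.trans (foldl_skip_filterMap (fun jc : Int × Char => String.ofList [jc.2] = ".")
      (fun jc => (String.ofList [jc.2], (jc.1, i)))
      (fun d p => d.modify p.1 [] (fun l => l ++ [p.2])) (PySem.List.enumerate row 0) d) ?_
  congr 1
  apply List.filterMap_congr
  intro jc _
  by_cases h : String.ofList [jc.2] = "." <;> simp [h]

theorem ab_eq (grid : List String) : make_antennas_map grid = make_antennas_map_alt grid := by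
  simp only [make_antennas_map, make_antennas_map_alt]
  rw [foldl_pyRange_eq_foldl_enumerate grid ""
    (fun (acc : PySem.Dict String (List (Int × Int))) (i : Int) (rs : String) =>
      (PySem.List.pyRange 0 (rs.toList.length : Int) 1).foldl (fun antennas j =>
        if String.ofList [PySem.List.pyGetD rs.toList j ' '] = "." then antennas
        else
          (if antennas.contains (String.ofList [PySem.List.pyGetD rs.toList j ' ']) then antennas
           else antennas.insert (String.ofList [PySem.List.pyGetD rs.toList j ' ']) ([] : List (Int × Int))).modify
            (String.ofList [PySem.List.pyGetD rs.toList j ' ']) [] (fun l => l ++ [(j, i)])) acc)]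
  have hbody : (fun (acc : PySem.Dict String (List (Int × Int))) (ir : Int × String) =>
      (PySem.List.pyRange 0 (ir.2.toList.length : Int) 1).foldl (fun antennas j =>
        if String.ofList [PySem.List.pyGetD ir.2.toList j ' '] = "." then antennas
        else
          (if antennas.contains (String.ofList [PySem.List.pyGetD ir.2.toList j ' ']) then antennas
           else antennas.insert (String.ofList [PySem.List.pyGetD ir.2.toList j ' ']) ([] : List (Int × Int))).modify
            (String.ofList [PySem.List.pyGetD ir.2.toList j ' ']) [] (fun l => l ++ [(j, ir.1)])) acc)
      = (fun acc ir =>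
        (((PySem.List.enumerate ir.2.toList 0).filterMap (fun jc =>
          if String.ofList [jc.2] ≠ "." then some (String.ofList [jc.2], (jc.1, ir.1)) else none)).foldl
          (fun d p => d.modify p.1 [] (fun l => l ++ [p.2])) acc)) := by
    funext acc ir
    exact inner_row ir.1 ir.2.toList acc
  rw [hbody, ← List.foldl_flatMap]
  set cells := (PySem.List.enumerate grid 0).flatMap (fun ir =>
      (PySem.List.enumerate ir.2.toList 0).filterMap (fun jc =>
        if String.ofList [jc.2] ≠ "." then some (String.ofList [jc.2], (jc.1, ir.1)) else none)) with hc
  have hnd : (cells.foldl (fun d p => d.modify p.1 [] (fun l => l ++ [p.2])) PySem.Dict.empty).keys.Nodup := by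
    rw [PySem.Dict.keys_foldl_modify_key]
    simp [PySem.Set.update_nil_left, PySem.Set.nodup_ofList]
  rw [PySem.Dict.items_eq_map_keys _ hnd []]
  rw [PySem.Dict.keys_foldl_modify_key]
  have : PySem.Set.update (PySem.Dict.empty : PySem.Dict String (List (Int × Int))).keys (cells.map (·.1))
      = PySem.Set.ofList (cells.map (·.1)) := by
    simp [PySem.Set.update_nil_left]
  rw [this]
  apply List.map_congr_left
  intro k _
  rw [PySem.Dict.getD_foldl_modify_append]
  simp

-- ===== VERDICT (by name: the statement is the Claim_ definition above) =====
theorem make_antennas_map_spec : Claim_equal_make_antennas_map := by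
  intro grid _
  exact ab_eq grid
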